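-- pv_equiv track=rewrite | github.com/adorosario/simple-evals | scripts/extract_hard_questions.py | categorize_failures
-- ===== SOURCE A (Python) =====
-- from typing import Dict, List, Set, Tuple
--
-- def categorize_failures(
--     failures_by_question: Dict[str, dict],
--     provider_failures: Dict[str, Set[str]]
-- ) -> Dict[str, List[str]]:
--     """
--     Categorize failures into groups:
--     - customgpt_only: Only CustomGPT failed
--     - shared_with_openai: CustomGPT and OpenAI RAG both failed
--     - all_rag_failed: All 3 RAG providers failed
--     - openai_rag_only: Only OpenAI RAG failed
--     - gemini_only: Only Gemini RAG failed
--     """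
--     categories = {
--         "customgpt_only": [],
--         "shared_with_openai": [],
--         "shared_with_gemini": [],
--         "all_rag_failed": [],
--         "openai_rag_only": [],
--         "gemini_only": [],
--         "other": [],
--     }
--
--     customgpt_fails = provider_failures.get("CustomGPT", set())
--     openai_fails = provider_failures.get("OpenAI_RAG", set())
--     gemini_fails = provider_failures.get("Google_Gemini_RAG", set())
--
--     for qid, details in failures_by_question.items():
--         providers = details["failed_providers"]
--
--         in_customgpt = "CustomGPT" in providers
--         in_openai = "OpenAI_RAG" in providers
--         in_gemini = "Google_Gemini_RAG" in providers
--
--         if in_customgpt and in_openai and in_gemini: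
--             categories["all_rag_failed"].append(qid)
--         elif in_customgpt and in_openai:
--             categories["shared_with_openai"].append(qid)
--         elif in_customgpt and in_gemini:
--             categories["shared_with_gemini"].append(qid)
--         elif in_customgpt:
--             categories["customgpt_only"].append(qid)
--         elif in_openai:
--             categories["openai_rag_only"].append(qid)
--         elif in_gemini:
--             categories["gemini_only"].append(qid)
--         else:
--             categories["other"].append(qid)
--
--     return categories
-- ===== SOURCE B (Python) =====
-- def categorize_failures(failures_by_question, provider_failures):
--     # Label each question once via an 8-entry table indexed by a provider bitmask,
--     # then build each category list by filtering the labelled sequence.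
--     names = ["other", "gemini_only", "openai_rag_only", "openai_rag_only",
--              "customgpt_only", "shared_with_gemini", "shared_with_openai", "all_rag_failed"]
--     labels = []
--     for qid, details in failures_by_question.items():
--         providers = details["failed_providers"]
--         mask = ((4 if "CustomGPT" in providers else 0)
--                 + (2 if "OpenAI_RAG" in providers else 0)
--                 + (1 if "Google_Gemini_RAG" in providers else 0))
--         labels.append((qid, names[mask]))
--     return {cat: [qid for qid, lab in labels if lab == cat]
--             for cat in ["customgpt_only", "shared_with_openai", "shared_with_gemini",
--                         "all_rag_failed", "openai_rag_only", "gemini_only", "other"]}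
-- ===== Notes on version B (the rewrite author's own statement) =====
-- stated objective: alternative
-- what changed: Replaces the six-branch elif cascade mutating a categories dict with a bitmask-indexed 8-entry lookup table that labels every question in one pass, after which each category list is produced by filtering the labelled sequence (no dict mutation; the dead provider_failures lookups are dropped).
import Mathlib
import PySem

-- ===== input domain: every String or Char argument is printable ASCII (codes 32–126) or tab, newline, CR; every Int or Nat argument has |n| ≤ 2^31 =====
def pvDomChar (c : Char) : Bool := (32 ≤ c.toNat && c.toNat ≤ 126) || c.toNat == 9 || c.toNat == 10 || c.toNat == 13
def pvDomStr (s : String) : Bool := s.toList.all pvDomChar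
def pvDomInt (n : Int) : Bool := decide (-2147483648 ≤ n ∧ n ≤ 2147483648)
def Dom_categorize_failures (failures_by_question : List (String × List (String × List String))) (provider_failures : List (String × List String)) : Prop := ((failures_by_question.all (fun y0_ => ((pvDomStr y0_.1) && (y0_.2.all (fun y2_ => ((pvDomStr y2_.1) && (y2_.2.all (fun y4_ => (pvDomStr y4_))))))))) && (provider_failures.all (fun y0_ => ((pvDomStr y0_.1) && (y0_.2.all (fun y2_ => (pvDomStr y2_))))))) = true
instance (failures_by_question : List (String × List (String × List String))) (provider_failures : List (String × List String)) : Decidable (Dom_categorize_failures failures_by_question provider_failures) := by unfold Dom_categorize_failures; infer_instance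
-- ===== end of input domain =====

-- B replaces A's elif cascade + dict mutation by a bitmask lookup table and per-category filtering (alternative decomposition, same cost).

-- ===== PORT A =====
-- first-match lookup in an association list (Python dict .get / [] on our dict representation)
def pvLookup (d : List (String × List String)) (k : String) : Option (List String) :=
  (d.find? (fun p => p.1 == k)).map (·.2)

-- categories[k].append(qid) on the 7-key categories dict (keys are distinct)
def pvAppendAt (cats : List (String × List String)) (k : String) (qid : String) : List (String × List String) :=
  cats.map (fun p => if p.1 == k then (p.1, p.2 ++ [qid]) else p)

-- the body of A's for-loop
def pvStepA (cats : List (String × List String)) (item : String × List (String × List String)) : List (String × List String) :=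
  let qid := item.1
  let providers := (pvLookup item.2 "failed_providers").getD []   -- KeyError when missing: excluded by Pre_
  let in_customgpt := providers.contains "CustomGPT"
  let in_openai := providers.contains "OpenAI_RAG"
  let in_gemini := providers.contains "Google_Gemini_RAG"
  if in_customgpt && in_openai && in_gemini then pvAppendAt cats "all_rag_failed" qid
  else if in_customgpt && in_openai then pvAppendAt cats "shared_with_openai" qid
  else if in_customgpt && in_gemini then pvAppendAt cats "shared_with_gemini" qid
  else if in_customgpt then pvAppendAt cats "customgpt_only" qid
  else if in_openai then pvAppendAt cats "openai_rag_only" qid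
  else if in_gemini then pvAppendAt cats "gemini_only" qid
  else pvAppendAt cats "other" qid

def categorize_failures (failures_by_question : List (String × List (String × List String))) (provider_failures : List (String × List String)) : List (String × List String) :=
  let categories : List (String × List String) :=
    [("customgpt_only", []), ("shared_with_openai", []), ("shared_with_gemini", []),
     ("all_rag_failed", []), ("openai_rag_only", []), ("gemini_only", []), ("other", [])]
  let _customgpt_fails := (pvLookup provider_failures "CustomGPT").getD []
  let _openai_fails := (pvLookup provider_failures "OpenAI_RAG").getD []
  let _gemini_fails := (pvLookup provider_failures "Google_Gemini_RAG").getD []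
  failures_by_question.foldl pvStepA categories

-- ===== PORT B =====
def pvNames : List String :=
  ["other", "gemini_only", "openai_rag_only", "openai_rag_only",
   "customgpt_only", "shared_with_gemini", "shared_with_openai", "all_rag_failed"]

def pvOrder : List String :=
  ["customgpt_only", "shared_with_openai", "shared_with_gemini",
   "all_rag_failed", "openai_rag_only", "gemini_only", "other"]

def pvLabel (details : List (String × List String)) : String :=
  let providers := (pvLookup details "failed_providers").getD []   -- KeyError when missing: excluded by Pre_
  let mask := (if providers.contains "CustomGPT" then 4 else 0)
            + (if providers.contains "OpenAI_RAG" then 2 else 0)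
            + (if providers.contains "Google_Gemini_RAG" then 1 else 0)
  pvNames.getD mask "other"

def categorize_failures_alt (failures_by_question : List (String × List (String × List String))) (provider_failures : List (String × List String)) : List (String × List String) :=
  let labels := failures_by_question.map (fun p => (p.1, pvLabel p.2))
  pvOrder.map (fun cat => (cat, (labels.filter (fun l => l.2 == cat)).map (·.1)))

-- ===== PRECONDITION & SPEC =====
-- Pre_ excludes exactly the questions whose details dict lacks the "failed_providers" key, on which Python A raises KeyError.
def Pre_categorize_failures (failures_by_question : List (String × List (String × List String))) (provider_failures : List (String × List String)) : Prop :=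
  ∀ p ∈ failures_by_question, (p.2.find? (fun kv => kv.1 == "failed_providers")).isSome
instance (failures_by_question : List (String × List (String × List String))) (provider_failures : List (String × List String)) : Decidable (Pre_categorize_failures failures_by_question provider_failures) := by unfold Pre_categorize_failures; infer_instance

def pvWitness_categorize_failures : (List (String × List (String × List String))) × (List (String × List String)) :=
  ([("q1", [("failed_providers", ["CustomGPT", "OpenAI_RAG"])]), ("q2", [("failed_providers", [])])],
   [("CustomGPT", ["q1"])])

def Spec_categorize_failures (failures_by_question : List (String × List (String × List String))) (provider_failures : List (String × List String)) (out : List (String × List String)) : Prop := out = categorize_failures_alt failures_by_question provider_failures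
instance (failures_by_question : List (String × List (String × List String))) (provider_failures : List (String × List String)) (out : List (String × List String)) : Decidable (Spec_categorize_failures failures_by_question provider_failures out) := by unfold Spec_categorize_failures; infer_instance

-- ===== CLAIM (what is proved, stated in full; the proofs are below) =====
def Claim_equal_categorize_failures : Prop := ∀ (failures_by_question : List (String × List (String × List String))) (provider_failures : List (String × List String)), Dom_categorize_failures failures_by_question provider_failures → Pre_categorize_failures failures_by_question provider_failures → Spec_categorize_failures failures_by_question provider_failures (categorize_failures failures_by_question provider_failures)

-- ===== LEMMAS AND PROOFS =====

-- A's branch cascade picks exactly the category B's table assigns.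
theorem stepA_eq_appendAt (cats : List (String × List String)) (item : String × List (String × List String)) :
    pvStepA cats item = pvAppendAt cats (pvLabel item.2) item.1 := by
  simp only [pvStepA, pvLabel, pvNames]
  cases hc : (((pvLookup item.2 "failed_providers").getD []).contains "CustomGPT") <;>
  cases ho : (((pvLookup item.2 "failed_providers").getD []).contains "OpenAI_RAG") <;>
  cases hg : (((pvLookup item.2 "failed_providers").getD []).contains "Google_Gemini_RAG") <;>
  simp [hg]

theorem appendAt_map (f : String → List String) (k qid : String) :
    pvAppendAt (pvOrder.map (fun c => (c, f c))) k qid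
      = pvOrder.map (fun c => (c, if c == k then f c ++ [qid] else f c)) := by
  simp only [pvAppendAt, List.map_map]
  refine List.map_congr_left (fun c _ => ?_)
  by_cases h : c = k <;> simp [h]

-- loop invariant: after folding, each category holds its previous contents plus the matching labelled qids
theorem loopA (fq : List (String × List (String × List String))) (f : String → List String) :
    fq.foldl pvStepA (pvOrder.map (fun c => (c, f c)))
      = pvOrder.map (fun c => (c, f c ++ ((fq.map (fun p => (p.1, pvLabel p.2))).filter (fun l => l.2 == c)).map (·.1))) := by
  induction fq generalizing f with
  | nil => simp
  | cons p t ih =>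
      rw [List.foldl_cons, stepA_eq_appendAt, appendAt_map]
      rw [ih (fun c => if c == pvLabel p.2 then f c ++ [p.1] else f c)]
      refine List.map_congr_left (fun c _ => ?_)
      simp only [List.map_cons, List.filter_cons]
      by_cases h : pvLabel p.2 = c
      · simp [h]
      · simp [h]
        exact fun e => h e.symm

theorem categorize_eq (fq : List (String × List (String × List String))) (pf : List (String × List String)) :
    categorize_failures fq pf = categorize_failures_alt fq pf := by
  have h0 : ([("customgpt_only", []), ("shared_with_openai", []), ("shared_with_gemini", []),
      ("all_rag_failed", []), ("openai_rag_only", []), ("gemini_only", []), ("other", [])] : List (String × List String))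
      = pvOrder.map (fun c => (c, (fun _ => ([] : List String)) c)) := rfl
  simp only [categorize_failures, categorize_failures_alt, h0, loopA]
  simp

-- ===== VERDICT (by name: the statement is the Claim_ definition above) =====
theorem categorize_failures_spec : Claim_equal_categorize_failures := by
  intro fq pf _ _
  exact categorize_eq fq pf
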